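-- pv_equiv track=rewrite | github.com/DK8DE/RotorTcpBridge | rotortcpbridge/udp_aswatchlist.py | _split_udp_csv_payload
-- ===== SOURCE A (Python) =====
-- def _strip_leading_quoted_tokens(s: str) -> str:
--     """
--     Entfernt führende ``\"…\"``-Blöcke (AirScout-Präfixe, z. B. PY/AS).
--
--     Inhalt und Anzahl können variieren; für die Karte zählt nur das CSV danach.
--     """
--     s = s.strip()
--     while s.startswith('"'):
--         end = s.find('"', 1)
--         if end == -1:
--             break
--         s = s[end + 1 :].strip()
--     return s
--
-- def _split_udp_csv_payload(nachricht: str, prefix: str) -> list[str] | None: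
--     """CSV-Felder nach allen führenden ``\"…\"``-Blöcken; ``None`` wenn nichts Nützliches übrig bleibt."""
--     if not nachricht.startswith(prefix):
--         return None
--     inhalt = nachricht[len(prefix) :].strip()
--     datenblock = _strip_leading_quoted_tokens(inhalt)
--     if not datenblock:
--         return None
--     return [e.strip() for e in datenblock.split(",") if e.strip()]
-- ===== SOURCE B (Python) =====
-- def _split_udp_csv_payload(nachricht: str, prefix: str) -> list[str] | None:
--     """Single forward pass: a small state machine finds where the leading
--     quoted blocks end, then the remainder is stripped and split once."""
--     if not nachricht.startswith(prefix):
--         return None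
--     s = nachricht[len(prefix):]
--     cut = 0            # start of the surviving remainder within s
--     in_quote = False
--     for k, ch in enumerate(s):
--         if in_quote:
--             if ch == '"':
--                 in_quote = False
--                 cut = k + 1
--         elif ch == '"':
--             in_quote = True
--         elif not ch.isspace():
--             break
--     datenblock = s[cut:].strip()
--     if not datenblock:
--         return None
--     return [e.strip() for e in datenblock.split(",") if e.strip()]
-- ===== Notes on version B (the rewrite author's own statement) =====
-- stated objective: alternative
-- what changed: A repeatedly strips, re-tests startswith and re-slices the string to peel leading quoted tokens (rescanning after every block); B makes one forward pass with a three-state scanner (position / in_quote / cut) over the payload, computes a single cut index, and strips and splits the remainder once.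
import Mathlib
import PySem

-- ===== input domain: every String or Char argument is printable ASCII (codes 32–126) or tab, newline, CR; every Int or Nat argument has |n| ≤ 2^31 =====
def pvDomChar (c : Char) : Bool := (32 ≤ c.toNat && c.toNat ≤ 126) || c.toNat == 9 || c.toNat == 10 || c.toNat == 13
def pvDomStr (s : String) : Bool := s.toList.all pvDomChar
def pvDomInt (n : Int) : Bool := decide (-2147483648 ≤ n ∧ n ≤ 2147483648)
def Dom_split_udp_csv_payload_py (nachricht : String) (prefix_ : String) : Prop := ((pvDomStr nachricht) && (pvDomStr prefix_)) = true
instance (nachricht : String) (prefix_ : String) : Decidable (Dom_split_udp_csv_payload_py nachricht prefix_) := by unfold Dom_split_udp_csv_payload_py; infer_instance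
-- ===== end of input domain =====

-- B replaces A's repeated strip/find/slice loop by one forward state-machine pass that
-- computes a single cut index (objective: alternative; equivalence proved for the return value).

-- ===== PORT A =====
-- termination fact for the while-loop of _strip_leading_quoted_tokens (cited in decreasing_by)
theorem pv_strip_length_le (cs : List Char) : (PySem.Chars.strip cs).length ≤ cs.length := by
  simp only [PySem.Chars.strip, PySem.Chars.rstrip, PySem.Chars.lstrip, List.length_reverse]
  calc (List.dropWhile PySem.Chars.isspace (List.dropWhile PySem.Chars.isspace cs).reverse).length
      ≤ (List.dropWhile PySem.Chars.isspace cs).reverse.length := List.length_dropWhile_le _ _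
    _ ≤ cs.length := by simpa using List.length_dropWhile_le PySem.Chars.isspace cs

-- the `while s.startswith('"')` loop of _strip_leading_quoted_tokens (entered with s already stripped)
def pvAStrip (s : List Char) : List Char :=
  if hq : PySem.Chars.startswith s ['"'] = true then
    let e := PySem.Chars.findFrom s ['"'] 1
    if he : e = -1 then s
    else pvAStrip (PySem.Chars.strip (PySem.Chars.slice s (some (e + 1)) none))
  else s
termination_by s.length
decreasing_by
  · have hs : s ≠ [] := by
      intro h; subst h; simp [PySem.Chars.startswith] at hq
    have hlen : 1 ≤ s.length := by
      cases s with
      | nil => exact absurd rfl hs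
      | cons a l => simp
    have hspec := PySem.Chars.findFrom_natCast_spec s ['"'] 1 hlen (by simpa using he)
    have he1 : (1 : Int) ≤ PySem.Chars.findFrom s ['"'] 1 := by simpa using hspec.1
    have hdrop : PySem.Chars.slice s (some (PySem.Chars.findFrom s ['"'] 1 + 1)) none
        = s.drop (PySem.Chars.findFrom s ['"'] 1 + 1).toNat := by
      rw [PySem.Chars.slice_eq_listSlice, PySem.List.slice_from _ (by omega)]
    have h2 : 2 ≤ (PySem.Chars.findFrom s ['"'] 1 + 1).toNat := by omega
    calc (PySem.Chars.strip (PySem.Chars.slice s (some (PySem.Chars.findFrom s ['"'] 1 + 1)) none)).length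
        ≤ (PySem.Chars.slice s (some (PySem.Chars.findFrom s ['"'] 1 + 1)) none).length :=
          pv_strip_length_le _
      _ = s.length - (PySem.Chars.findFrom s ['"'] 1 + 1).toNat := by rw [hdrop, List.length_drop]
      _ < s.length := by omega

-- _strip_leading_quoted_tokens
def pvStripLeadingQuotedTokens (s : List Char) : List Char :=
  pvAStrip (PySem.Chars.strip s)

def split_udp_csv_payload_py (nachricht : String) (prefix_ : String) : Option (List String) :=
  if PySem.Str.startswith nachricht prefix_ = false then none
  else
    let inhalt := PySem.Chars.strip
      (PySem.Chars.slice nachricht.toList (some (PySem.Chars.len prefix_.toList)) none)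
    let datenblock := pvStripLeadingQuotedTokens inhalt
    if datenblock = [] then none
    else some (((PySem.Chars.splitOn datenblock [',']).filter
        (fun e => PySem.Chars.strip e ≠ [])).map (fun e => String.ofList (PySem.Chars.strip e)))

-- ===== PORT B =====
-- the `for k, ch in enumerate(s)` state machine of Source B: carries position k, in_quote, cut
def pvScanCut : List Char → Nat → Bool → Nat → Nat
  | [], _, _, cut => cut
  | c :: rest, k, inq, cut =>
    if inq then
      if c = '"' then pvScanCut rest (k + 1) false (k + 1)
      else pvScanCut rest (k + 1) true cut
    else if c = '"' then pvScanCut rest (k + 1) true cut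
    else if PySem.Chars.isspace c then pvScanCut rest (k + 1) false cut
    else cut

def split_udp_csv_payload_py_alt (nachricht : String) (prefix_ : String) : Option (List String) :=
  if PySem.Str.startswith nachricht prefix_ = false then none
  else
    let s := PySem.Chars.slice nachricht.toList (some (PySem.Chars.len prefix_.toList)) none
    let cut := pvScanCut s 0 false 0
    let datenblock := PySem.Chars.strip (PySem.Chars.slice s (some ((cut : Nat) : Int)) none)
    if datenblock = [] then none
    else some (((PySem.Chars.splitOn datenblock [',']).filter
        (fun e => PySem.Chars.strip e ≠ [])).map (fun e => String.ofList (PySem.Chars.strip e)))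

-- ===== PRECONDITION & SPEC =====
def Spec_split_udp_csv_payload_py (nachricht : String) (prefix_ : String) (out : Option (List String)) : Prop := out = split_udp_csv_payload_py_alt nachricht prefix_
instance (nachricht : String) (prefix_ : String) (out : Option (List String)) : Decidable (Spec_split_udp_csv_payload_py nachricht prefix_ out) := by unfold Spec_split_udp_csv_payload_py; infer_instance

-- ===== CLAIM (what is proved, stated in full; the proofs are below) =====
def Claim_equal_split_udp_csv_payload_py : Prop := ∀ (nachricht : String) (prefix_ : String), Dom_split_udp_csv_payload_py nachricht prefix_ → Spec_split_udp_csv_payload_py nachricht prefix_ (split_udp_csv_payload_py nachricht prefix_)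

-- ===== LEMMAS AND PROOFS =====

-- rstrip unfolding on a cons cell
theorem pv_rstrip_cons (c : Char) (t : List Char) :
    PySem.Chars.rstrip (c :: t) =
      if PySem.Chars.rstrip t = [] then (if PySem.Chars.isspace c then [] else [c])
      else c :: PySem.Chars.rstrip t := by
  have hiff : PySem.Chars.rstrip t = [] ↔ List.dropWhile PySem.Chars.isspace t.reverse = [] := by
    simp [PySem.Chars.rstrip]
  by_cases ht : PySem.Chars.rstrip t = []
  · rw [if_pos ht]
    show (List.dropWhile PySem.Chars.isspace (c::t).reverse).reverse = _
    rw [List.reverse_cons, List.dropWhile_append, if_pos (by simp only [List.isEmpty_iff]; exact hiff.mp ht)]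
    cases hsp : PySem.Chars.isspace c <;> simp [List.dropWhile, hsp]
  · rw [if_neg ht]
    show (List.dropWhile PySem.Chars.isspace (c::t).reverse).reverse = _
    rw [List.reverse_cons, List.dropWhile_append, if_neg (by simp only [List.isEmpty_iff]; exact fun h => ht (hiff.mpr h))]
    simp [PySem.Chars.rstrip]

theorem pv_rstrip_nil : PySem.Chars.rstrip ([] : List Char) = [] := by
  simp [PySem.Chars.rstrip]

theorem pv_rstrip_all_space (w : List Char) (h : ∀ c ∈ w, PySem.Chars.isspace c = true) :
    PySem.Chars.rstrip w = [] := by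
  induction w with
  | nil => exact pv_rstrip_nil
  | cons c t ih =>
    rw [pv_rstrip_cons, if_pos (ih (fun x hx => h x (List.mem_cons_of_mem _ hx))),
      if_pos (h c List.mem_cons_self)]

theorem pv_rstrip_eq_nil_all_space (w : List Char) (h : PySem.Chars.rstrip w = []) :
    ∀ c ∈ w, PySem.Chars.isspace c = true := by
  induction w with
  | nil => intro c hc; cases hc
  | cons c t ih =>
    rw [pv_rstrip_cons] at h
    by_cases ht : PySem.Chars.rstrip t = []
    · rw [if_pos ht] at h
      by_cases hsp : PySem.Chars.isspace c = true
      · intro x hx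
        rcases List.mem_cons.mp hx with rfl | hx
        · exact hsp
        · exact ih ht x hx
      · rw [if_neg hsp] at h; cases h
    · rw [if_neg ht] at h; cases h

theorem pv_rstrip_cons_not_space (c : Char) (t : List Char) (h : PySem.Chars.isspace c = false) :
    PySem.Chars.rstrip (c :: t) = c :: PySem.Chars.rstrip t := by
  rw [pv_rstrip_cons]
  by_cases ht : PySem.Chars.rstrip t = []
  · rw [if_pos ht, if_neg (by simp [h]), ht]
  · rw [if_neg ht]

theorem pv_rstrip_append (x y : List Char) (h : PySem.Chars.rstrip y ≠ []) :
    PySem.Chars.rstrip (x ++ y) = x ++ PySem.Chars.rstrip y := by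
  induction x with
  | nil => simp
  | cons a x ih =>
    rw [List.cons_append, pv_rstrip_cons, if_neg (by rw [ih]; simp [h]), ih, List.cons_append]

theorem pv_mem_rstrip (a : Char) (x : List Char) (h : PySem.Chars.isspace a = false) :
    a ∈ PySem.Chars.rstrip x ↔ a ∈ x := by
  induction x with
  | nil => simp [pv_rstrip_nil]
  | cons c t ih =>
    rw [pv_rstrip_cons]
    by_cases ht : PySem.Chars.rstrip t = []
    · have hts := pv_rstrip_eq_nil_all_space t ht
      have hat : a ∉ t := fun hx => by rw [hts a hx] at h; cases h
      rw [if_pos ht]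
      by_cases hsp : PySem.Chars.isspace c = true
      · have hac : a ≠ c := fun hx => by rw [hx, hsp] at h; cases h
        simp [hsp, hac, hat]
      · simp only [if_neg hsp]
        simp [hat]
    · rw [if_neg ht]
      simp [ih]

theorem pv_rstrip_idem (x : List Char) :
    PySem.Chars.rstrip (PySem.Chars.rstrip x) = PySem.Chars.rstrip x := by
  induction x with
  | nil => rw [pv_rstrip_nil, pv_rstrip_nil]
  | cons c t ih =>
    rw [pv_rstrip_cons]
    by_cases ht : PySem.Chars.rstrip t = []
    · rw [if_pos ht]
      by_cases hsp : PySem.Chars.isspace c = true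
      · rw [if_pos hsp, pv_rstrip_nil]
      · rw [if_neg hsp, pv_rstrip_cons, pv_rstrip_nil, if_pos rfl, if_neg hsp]
    · rw [if_neg ht, pv_rstrip_cons, ih, if_neg ht]

theorem pv_strip_rstrip (v : List Char) :
    PySem.Chars.strip (PySem.Chars.rstrip v) = PySem.Chars.strip v := by
  have hdec : v.takeWhile PySem.Chars.isspace ++ v.dropWhile PySem.Chars.isspace = v :=
    List.takeWhile_append_dropWhile
  have htw : ∀ c ∈ v.takeWhile PySem.Chars.isspace, PySem.Chars.isspace c = true :=
    fun c hc => List.mem_takeWhile_imp hc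
  cases hdw : v.dropWhile PySem.Chars.isspace with
  | nil =>
    have hall : ∀ c ∈ v, PySem.Chars.isspace c = true := List.dropWhile_eq_nil_iff.mp hdw
    rw [pv_rstrip_all_space v hall]
    simp [PySem.Chars.strip, PySem.Chars.lstrip, hdw, pv_rstrip_nil]
  | cons c t =>
    have hc : PySem.Chars.isspace c = false := by
      have hne : v.dropWhile PySem.Chars.isspace ≠ [] := by rw [hdw]; simp
      have := List.head_dropWhile_not PySem.Chars.isspace hne
      rwa [show (v.dropWhile PySem.Chars.isspace).head hne = c by simp [hdw]] at this
    have hrd : PySem.Chars.rstrip (c :: t) = c :: PySem.Chars.rstrip t :=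
      pv_rstrip_cons_not_space c t hc
    have hrv : PySem.Chars.rstrip v = v.takeWhile PySem.Chars.isspace ++ (c :: PySem.Chars.rstrip t) := by
      conv_lhs => rw [← hdec, hdw]
      rw [pv_rstrip_append _ _ (by rw [hrd]; simp), hrd]
    have hl : List.dropWhile PySem.Chars.isspace
        (v.takeWhile PySem.Chars.isspace ++ (c :: PySem.Chars.rstrip t)) = c :: PySem.Chars.rstrip t := by
      rw [List.dropWhile_append]
      rw [if_pos (by simp [List.dropWhile_eq_nil_iff.mpr htw])]
      simp [List.dropWhile, hc]
    rw [PySem.Chars.strip, PySem.Chars.strip, PySem.Chars.lstrip, PySem.Chars.lstrip, hrv, hl, hdw,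
      pv_rstrip_cons_not_space c _ hc, pv_rstrip_idem, hrd]

theorem pv_strip_idem (s : List Char) :
    PySem.Chars.strip (PySem.Chars.strip s) = PySem.Chars.strip s := by
  rw [show PySem.Chars.strip s = PySem.Chars.rstrip (PySem.Chars.lstrip s) from rfl,
    pv_strip_rstrip]
  show PySem.Chars.rstrip (PySem.Chars.lstrip (PySem.Chars.lstrip s)) = _
  rw [show PySem.Chars.lstrip (PySem.Chars.lstrip s) = PySem.Chars.lstrip s by
    simp only [PySem.Chars.lstrip]
    cases hd : List.dropWhile PySem.Chars.isspace s with
    | nil => simp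
    | cons c t =>
      have hne : List.dropWhile PySem.Chars.isspace s ≠ [] := by rw [hd]; simp
      have hc := List.head_dropWhile_not PySem.Chars.isspace hne
      rw [show (List.dropWhile PySem.Chars.isspace s).head hne = c by simp [hd]] at hc
      simp [List.dropWhile, hc]]

-- scan lemmas
theorem pv_scan_shift (cs : List Char) : ∀ (k cut d : Nat) (inq : Bool),
    pvScanCut cs (k + d) inq (cut + d) = pvScanCut cs k inq cut + d := by
  induction cs with
  | nil => intro k cut d inq; rfl
  | cons c rest ih =>
    intro k cut d inq
    simp only [pvScanCut]
    split_ifs with h1 h2 h2 h3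
    · rw [show k + d + 1 = (k + 1) + d from by omega]; exact ih (k+1) (k+1) d false
    · rw [show k + d + 1 = (k + 1) + d from by omega]; exact ih (k+1) cut d true
    · rw [show k + d + 1 = (k + 1) + d from by omega]; exact ih (k+1) cut d true
    · rw [show k + d + 1 = (k + 1) + d from by omega]; exact ih (k+1) cut d false
    · rfl

theorem pv_scan_ws (w : List Char) (h : ∀ c ∈ w, PySem.Chars.isspace c = true) :
    ∀ (t : List Char) (k cut : Nat),
    pvScanCut (w ++ t) k false cut = pvScanCut t (k + w.length) false cut := by
  induction w with
  | nil => intro t k cut; simp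
  | cons c w ih =>
    intro t k cut
    have hsp := h c List.mem_cons_self
    have hq : ¬ c = '"' := by intro h'; rw [h'] at hsp; exact absurd hsp (by decide)
    rw [List.cons_append,
      show pvScanCut (c :: (w ++ t)) k false cut = pvScanCut (w ++ t) (k + 1) false cut from by
        simp [pvScanCut, hq, hsp],
      ih (fun x hx => h x (List.mem_cons_of_mem _ hx)) t (k+1) cut,
      show k + 1 + w.length = k + (c :: w).length from by simp; omega]

theorem pv_scan_inq_no_close (cs : List Char) (h : '"' ∉ cs) :
    ∀ (k cut : Nat), pvScanCut cs k true cut = cut := by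
  induction cs with
  | nil => intro k cut; rfl
  | cons c rest ih =>
    intro k cut
    have hc : ¬ c = '"' := fun h' => h (h' ▸ List.mem_cons_self)
    rw [show pvScanCut (c :: rest) k true cut = pvScanCut rest (k + 1) true cut from by
      simp [pvScanCut, hc]]
    exact ih (fun hm => h (List.mem_cons_of_mem _ hm)) _ _

theorem pv_scan_inq_close (u : List Char) (h : '"' ∉ u) :
    ∀ (v : List Char) (k cut : Nat),
    pvScanCut (u ++ '"' :: v) k true cut = pvScanCut v (k + u.length + 1) false (k + u.length + 1) := by
  induction u with
  | nil => intro v k cut; simp [pvScanCut]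
  | cons a u ih =>
    intro v k cut
    have ha : ¬ a = '"' := fun h' => h (h' ▸ List.mem_cons_self)
    rw [List.cons_append,
      show pvScanCut (a :: (u ++ '"' :: v)) k true cut = pvScanCut (u ++ '"' :: v) (k + 1) true cut from by
        simp [pvScanCut, ha],
      ih (fun hm => h (List.mem_cons_of_mem _ hm)) v (k+1) cut,
      show k + 1 + u.length + 1 = k + (a :: u).length + 1 from by simp; omega]

-- first quote position
theorem pv_find_quote (u v : List Char) (h : '"' ∉ u) :
    PySem.Chars.find (u ++ '"' :: v) ['"'] = (u.length : Int) := by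
  have hmem : '"' ∈ u ++ '"' :: v := List.mem_append_right _ List.mem_cons_self
  have hinf : ['"'] <:+: (u ++ '"' :: v) := (List.singleton_infix_iff _ _).mpr hmem
  have hnn : 0 ≤ PySem.Chars.find (u ++ '"' :: v) ['"'] := (PySem.Chars.find_nonneg_iff _ _).mpr hinf
  obtain ⟨hpre, hmin⟩ := PySem.Chars.find_spec hnn
  have hq1 : ['"'] <+: (u ++ '"' :: v).drop u.length := by
    rw [List.drop_left]; exact ⟨v, rfl⟩
  have hle : (PySem.Chars.find (u ++ '"' :: v) ['"']).toNat ≤ u.length := by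
    by_contra hlt
    exact hmin u.length (by omega) hq1
  have hge : ¬ (PySem.Chars.find (u ++ '"' :: v) ['"']).toNat < u.length := by
    intro hlt
    have hhd : ((u ++ '"' :: v).drop (PySem.Chars.find (u ++ '"' :: v) ['"']).toNat).head? = some '"' := by
      rcases hpre with ⟨t2, ht2⟩
      rw [← ht2]; rfl
    rw [List.head?_drop, List.getElem?_append_left hlt] at hhd
    exact h (List.mem_of_getElem? hhd)
  omega

-- pvAStrip unfolding lemmas
theorem pv_astrip_no_quote (s : List Char) (h : PySem.Chars.startswith s ['"'] = false) :
    pvAStrip s = s := by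
  rw [pvAStrip, dif_neg (by simp [h])]

theorem pv_astrip_unterminated (s : List Char) (h : PySem.Chars.startswith s ['"'] = true)
    (he : PySem.Chars.findFrom s ['"'] 1 = -1) : pvAStrip s = s := by
  rw [pvAStrip, dif_pos h]
  simp only [he]
  simp

theorem pv_astrip_step (s : List Char) (h : PySem.Chars.startswith s ['"'] = true)
    (e : Int) (he : PySem.Chars.findFrom s ['"'] 1 = e) (hne : ¬ e = -1) :
    pvAStrip s = pvAStrip (PySem.Chars.strip (PySem.Chars.slice s (some (e + 1)) none)) := by
  rw [pvAStrip, dif_pos h]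
  simp only [he, dif_neg hne]

-- main loop equivalence
theorem pv_main (n : Nat) : ∀ (s : List Char), s.length ≤ n →
    pvAStrip (PySem.Chars.strip s) = PySem.Chars.strip (s.drop (pvScanCut s 0 false 0)) := by
  induction n with
  | zero =>
    intro s hs
    have hnil : s = [] := List.eq_nil_of_length_eq_zero (Nat.le_zero.mp hs)
    subst hnil
    rw [show PySem.Chars.strip [] = [] from rfl,
      pv_astrip_no_quote [] (by decide)]
    rfl
  | succ m IH =>
    intro s hs
    have hdec : s.takeWhile PySem.Chars.isspace ++ s.dropWhile PySem.Chars.isspace = s :=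
      List.takeWhile_append_dropWhile
    have htw : ∀ c ∈ s.takeWhile PySem.Chars.isspace, PySem.Chars.isspace c = true :=
      fun c hc => List.mem_takeWhile_imp hc
    have hstrip : PySem.Chars.strip s = PySem.Chars.rstrip (s.dropWhile PySem.Chars.isspace) := rfl
    cases hdw : s.dropWhile PySem.Chars.isspace with
    | nil =>
      have hs0 : PySem.Chars.strip s = [] := by rw [hstrip, hdw, pv_rstrip_nil]
      have hscan : pvScanCut s 0 false 0 = 0 := by
        conv_lhs => rw [← hdec, hdw]
        rw [pv_scan_ws _ htw]
        rfl
      rw [hs0, hscan, List.drop_zero, hs0, pv_astrip_no_quote [] (by decide)]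
    | cons c t' =>
      have hne : s.dropWhile PySem.Chars.isspace ≠ [] := by rw [hdw]; simp
      have hc : PySem.Chars.isspace c = false := by
        have h2 := List.head_dropWhile_not PySem.Chars.isspace hne
        rwa [show (s.dropWhile PySem.Chars.isspace).head hne = c by simp [hdw]] at h2
      obtain ⟨W, hWsp, hsW⟩ : ∃ W, (∀ x ∈ W, PySem.Chars.isspace x = true) ∧ s = W ++ c :: t' :=
        ⟨s.takeWhile PySem.Chars.isspace, htw, by conv_lhs => rw [← hdec, hdw]⟩
      have hscan1 : pvScanCut s 0 false 0 = pvScanCut (c :: t') W.length false 0 := by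
        conv_lhs => rw [hsW]
        rw [pv_scan_ws _ hWsp, Nat.zero_add]
      by_cases hq : c = '"'
      · subst hq
        have hstripc : PySem.Chars.strip s = '"' :: PySem.Chars.rstrip t' := by
          rw [hstrip, hdw, pv_rstrip_cons_not_space _ _ (by decide)]
        by_cases hqt : '"' ∈ t'
        · -- closing quote exists: one quoted block is consumed on each side
          have hdw2 : t'.dropWhile (fun x => x != '"') ≠ [] := fun hnil => by
            have h2 := List.dropWhile_eq_nil_iff.mp hnil '"' hqt
            simp at h2
          cases hd2 : t'.dropWhile (fun x => x != '"') with
          | nil => exact absurd hd2 hdw2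
          | cons b v =>
            have hb : b = '"' := by
              have h2 := List.head_dropWhile_not (fun x => x != '"') hdw2
              rw [show (t'.dropWhile (fun x => x != '"')).head hdw2 = b by simp [hd2]] at h2
              simpa using h2
            subst hb
            obtain ⟨u, hnu, ht'⟩ : ∃ u, ('"' ∉ u) ∧ t' = u ++ '"' :: v :=
              ⟨t'.takeWhile (fun x => x != '"'),
               fun hm => by have h2 := List.mem_takeWhile_imp hm; simp at h2,
               by conv_lhs => rw [← List.takeWhile_append_dropWhile (p := fun x => x != '"') (l := t'), hd2]⟩
            have hlens : s.length = W.length + (u.length + v.length + 2) := by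
              rw [hsW, ht']
              simp only [List.length_append, List.length_cons]
              omega
            have hv : v.length ≤ m := by omega
            -- A side
            have hrt : PySem.Chars.rstrip t' = u ++ '"' :: PySem.Chars.rstrip v := by
              conv_lhs => rw [ht']
              rw [pv_rstrip_append _ _ (by rw [pv_rstrip_cons_not_space _ _ (by decide)]; simp),
                pv_rstrip_cons_not_space _ _ (by decide)]
            have hfind : PySem.Chars.find (u ++ '"' :: PySem.Chars.rstrip v) ['"']
                = (u.length : Int) := pv_find_quote _ _ hnu
            have he : PySem.Chars.findFrom ('"' :: (u ++ '"' :: PySem.Chars.rstrip v)) ['"'] 1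
                = 1 + (u.length : Int) := by
              rw [show (1:Int) = ((1:Nat):Int) by simp,
                PySem.Chars.findFrom_natCast _ _ 1 (by simp)]
              rw [show List.drop 1 ('"' :: (u ++ '"' :: PySem.Chars.rstrip v))
                  = u ++ '"' :: PySem.Chars.rstrip v from rfl,
                hfind, if_neg (by omega)]
            have hslice : PySem.Chars.slice ('"' :: (u ++ '"' :: PySem.Chars.rstrip v))
                (some ((1 + (u.length : Int)) + 1)) none = PySem.Chars.rstrip v := by
              rw [PySem.Chars.slice_eq_listSlice,
                show (1 + (u.length : Int)) + 1 = ((u.length + 2 : Nat) : Int) by push_cast; ring,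
                PySem.List.slice_from_natCast,
                show ('"' :: (u ++ '"' :: PySem.Chars.rstrip v))
                  = (('"' :: u) ++ ['"']) ++ PySem.Chars.rstrip v by simp,
                show u.length + 2 = (('"' :: u) ++ ['"']).length by simp]
              exact List.drop_left
            -- B side
            have hscan : pvScanCut s 0 false 0
                = pvScanCut v 0 false 0 + (W.length + u.length + 2) := by
              rw [hscan1]
              conv_lhs => rw [ht']
              rw [show pvScanCut ('"' :: (u ++ '"' :: v)) W.length false 0
                  = pvScanCut (u ++ '"' :: v) (W.length + 1) true 0 from by simp [pvScanCut],
                pv_scan_inq_close _ hnu v _ 0,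
                show W.length + 1 + u.length + 1 = 0 + (W.length + u.length + 2) from by omega,
                pv_scan_shift v 0 0 _ false]
            have hdrop : s.drop (pvScanCut s 0 false 0) = v.drop (pvScanCut v 0 false 0) := by
              rw [hscan, Nat.add_comm, ← List.drop_drop]
              congr 1
              conv_lhs => rw [hsW, ht']
              rw [show W ++ '"' :: (u ++ '"' :: v) = ((W ++ '"' :: u) ++ ['"']) ++ v by simp,
                show W.length + u.length + 2 = ((W ++ '"' :: u) ++ ['"']).length by
                  simp only [List.length_append, List.length_cons, List.length_nil]
                  omega]
              exact List.drop_left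
            rw [hstripc, hrt,
              pv_astrip_step _ (by simp [PySem.Chars.startswith, List.isPrefixOf]) (1 + (u.length : Int)) he (by omega),
              hslice, pv_strip_rstrip, IH v hv, hdrop]
        · -- no closing quote: both sides keep everything
          have hnotin : '"' ∉ PySem.Chars.rstrip t' :=
            fun hm => hqt ((pv_mem_rstrip _ _ (by decide)).mp hm)
          have he : PySem.Chars.findFrom ('"' :: PySem.Chars.rstrip t') ['"'] 1 = -1 := by
            rw [show (1:Int) = ((1:Nat):Int) by simp,
              PySem.Chars.findFrom_natCast _ _ 1 (by simp)]
            rw [show List.drop 1 ('"' :: PySem.Chars.rstrip t') = PySem.Chars.rstrip t' from rfl,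
              if_pos ((PySem.Chars.find_eq_neg_one_iff _ _).mpr
                (fun hi => hnotin ((List.singleton_infix_iff _ _).mp hi)))]
            simp
          have hscan : pvScanCut s 0 false 0 = 0 := by
            rw [hscan1,
              show pvScanCut ('"' :: t') W.length false 0
                = pvScanCut t' (W.length + 1) true 0 from by simp [pvScanCut],
              pv_scan_inq_no_close t' hqt]
          rw [hscan, List.drop_zero, hstripc,
            pv_astrip_unterminated _ (by simp [PySem.Chars.startswith, List.isPrefixOf]) he]
      · -- remainder starts with an ordinary character: both loops stop
        have hstripc : PySem.Chars.strip s = c :: PySem.Chars.rstrip t' := by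
          rw [hstrip, hdw, pv_rstrip_cons_not_space c t' hc]
        have hscan : pvScanCut s 0 false 0 = 0 := by
          rw [hscan1]
          simp [pvScanCut, hq, hc]
        rw [hscan, List.drop_zero, hstripc,
          pv_astrip_no_quote _ (by
            simp [PySem.Chars.startswith, List.isPrefixOf]
            exact fun h' => hq h'.symm)]

-- ===== VERDICT (by name: the statement is the Claim_ definition above) =====
theorem split_udp_csv_payload_py_spec : Claim_equal_split_udp_csv_payload_py := by
  intro nachricht prefix_ _
  unfold Spec_split_udp_csv_payload_py
  unfold split_udp_csv_payload_py split_udp_csv_payload_py_alt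
  cases hsw : PySem.Str.startswith nachricht prefix_ with
  | false => simp
  | true =>
    simp only [Bool.true_eq_false, if_false]
    have hslice : PySem.Chars.slice
        (PySem.Chars.slice nachricht.toList (some (PySem.Chars.len prefix_.toList)) none)
        (some ((pvScanCut (PySem.Chars.slice nachricht.toList (some (PySem.Chars.len prefix_.toList)) none) 0 false 0 : Nat) : Int)) none
        = (PySem.Chars.slice nachricht.toList (some (PySem.Chars.len prefix_.toList)) none).drop
            (pvScanCut (PySem.Chars.slice nachricht.toList (some (PySem.Chars.len prefix_.toList)) none) 0 false 0) := by
      rw [PySem.Chars.slice_eq_listSlice, PySem.List.slice_from_natCast]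
    have hdb : pvStripLeadingQuotedTokens
        (PySem.Chars.strip (PySem.Chars.slice nachricht.toList (some (PySem.Chars.len prefix_.toList)) none))
        = PySem.Chars.strip
          ((PySem.Chars.slice nachricht.toList (some (PySem.Chars.len prefix_.toList)) none).drop
            (pvScanCut (PySem.Chars.slice nachricht.toList (some (PySem.Chars.len prefix_.toList)) none) 0 false 0)) := by
      unfold pvStripLeadingQuotedTokens
      rw [pv_strip_idem]
      exact pv_main _ _ le_rfl
    rw [hslice, hdb]
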